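-- pv_equiv track=rewrite | github.com/NguyenHoang1312/SourceCode | Python/main.py | check_array
-- ===== SOURCE A (Python) =====
-- def check_array(arr):
--     tang_ngat = [arr[i]<arr[i+1] for i in range(len(arr)-1)]
--     giam_ngat = [arr[i]>arr[i+1] for i in range(len(arr)-1)]
--     tang = [arr[i]<=arr[i+1] for i in range(len(arr)-1)]
--     giam = [arr[i]>=arr[i+1] for i in range(len(arr)-1)]
--     bang = [arr[i]==arr[i+1] for i in range(len(arr)-1)]
--     if all(bang):
--         return 'tất cả bằng nhau'
--     elif all(tang_ngat):
--         return 'tăng ngặt'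
--     elif all(giam_ngat):
--         return 'giảm ngặt'
--     elif all(giam):
--         return 'giảm'
--     elif all(tang):
--         return 'tăng'
--     else:
--         return 'Không sắp xếp'
-- ===== SOURCE B (Python) =====
-- def check_array(arr):
--     asc = sorted(arr)
--     distinct = len(set(arr))
--     if distinct <= 1:
--         return 'tất cả bằng nhau'
--     if arr == asc:
--         return 'tăng ngặt' if distinct == len(arr) else 'tăng'
--     if arr == list(reversed(asc)):
--         return 'giảm ngặt' if distinct == len(arr) else 'giảm'
--     return 'Không sắp xếp'
-- ===== Notes on version B (the rewrite author's own statement) =====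
-- stated objective: alternative
-- what changed: Replaces A's five adjacent-pair comprehensions and priority cascade by a sort-based classification: sort the list once, compare arr with sorted(arr) and its reverse, and use len(set(arr)) to tell strict from non-strict and all-equal.
import Mathlib
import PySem

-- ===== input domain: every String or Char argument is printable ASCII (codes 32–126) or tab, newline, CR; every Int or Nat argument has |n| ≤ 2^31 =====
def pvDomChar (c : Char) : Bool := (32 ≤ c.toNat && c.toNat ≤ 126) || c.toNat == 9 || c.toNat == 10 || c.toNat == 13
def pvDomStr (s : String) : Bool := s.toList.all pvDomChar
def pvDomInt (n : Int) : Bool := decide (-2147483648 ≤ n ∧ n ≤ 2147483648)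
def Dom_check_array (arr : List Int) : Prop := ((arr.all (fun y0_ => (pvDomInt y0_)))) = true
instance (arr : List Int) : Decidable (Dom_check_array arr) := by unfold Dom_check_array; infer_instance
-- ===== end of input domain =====

-- B replaces A's five adjacent-pair comprehensions by a sort-based classification:
-- it sorts the list once and compares arr with sorted(arr) / its reverse, using
-- len(set(arr)) to separate strict from non-strict; same return values everywhere.

-- ===== PORT A =====
-- indices i and i+1 always lie in range for i in range(len(arr)-1), so pyGetD's default is never used
def check_array (arr : List Int) : String :=
  let tang_ngat := (PySem.List.pyRange 0 ((arr.length : Int) - 1) 1).map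
    (fun i => decide (PySem.List.pyGetD arr i 0 < PySem.List.pyGetD arr (i+1) 0))
  let giam_ngat := (PySem.List.pyRange 0 ((arr.length : Int) - 1) 1).map
    (fun i => decide (PySem.List.pyGetD arr i 0 > PySem.List.pyGetD arr (i+1) 0))
  let tang := (PySem.List.pyRange 0 ((arr.length : Int) - 1) 1).map
    (fun i => decide (PySem.List.pyGetD arr i 0 ≤ PySem.List.pyGetD arr (i+1) 0))
  let giam := (PySem.List.pyRange 0 ((arr.length : Int) - 1) 1).map
    (fun i => decide (PySem.List.pyGetD arr i 0 ≥ PySem.List.pyGetD arr (i+1) 0))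
  let bang := (PySem.List.pyRange 0 ((arr.length : Int) - 1) 1).map
    (fun i => decide (PySem.List.pyGetD arr i 0 = PySem.List.pyGetD arr (i+1) 0))
  if bang.all id then "tất cả bằng nhau"
  else if tang_ngat.all id then "tăng ngặt"
  else if giam_ngat.all id then "giảm ngặt"
  else if giam.all id then "giảm"
  else if tang.all id then "tăng"
  else "Không sắp xếp"

-- ===== PORT B =====
def check_array_alt (arr : List Int) : String :=
  let asc := PySem.List.sorted arr (fun x => x) false
  let distinct := (PySem.Set.ofList arr).length
  if distinct ≤ 1 then "tất cả bằng nhau"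
  else if arr = asc then
    (if distinct = arr.length then "tăng ngặt" else "tăng")
  else if arr = asc.reverse then
    (if distinct = arr.length then "giảm ngặt" else "giảm")
  else "Không sắp xếp"

-- ===== PRECONDITION & SPEC =====
def Spec_check_array (arr : List Int) (out : String) : Prop := out = check_array_alt arr
instance (arr : List Int) (out : String) : Decidable (Spec_check_array arr out) := by unfold Spec_check_array; infer_instance

-- ===== CLAIM (what is proved, stated in full; the proofs are below) =====
def Claim_equal_check_array : Prop := ∀ (arr : List Int), Dom_check_array arr → Spec_check_array arr (check_array arr)

-- ===== LEMMAS AND PROOFS =====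

-- Nat-level form of A's comprehensions: all over indices = all over adjacent pairs
theorem all_range_adjacent (cmp : Int → Int → Bool) :
    ∀ (l : List Int),
      ((List.range (l.length - 1)).map (fun k => cmp (l.getD k 0) (l.getD (k+1) 0))).all id
      = (l.zip l.tail).all (fun p => cmp p.1 p.2)
  | [] => by simp
  | [_] => by simp
  | x :: y :: t => by
    have ih := all_range_adjacent cmp (y :: t)
    simp only [List.length_cons, Nat.add_sub_cancel, List.range_succ_eq_map,
      List.map_cons, List.map_map, List.all_cons, List.zip_cons_cons, List.tail_cons] at *
    rw [show ((fun k => cmp ((x :: y :: t).getD k 0) ((x :: y :: t).getD (k+1) 0)) ∘ Nat.succ)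
        = (fun k => cmp ((y :: t).getD k 0) ((y :: t).getD (k+1) 0)) from
      funext fun k => by simp]
    rw [ih]
    simp [List.getD]

-- cast bridge: pyGetD at a Nat-cast index plus one
theorem pyGetD_cast_succ (l : List Int) (k : Nat) :
    PySem.List.pyGetD l ((k : Int) + 1) 0 = l.getD (k+1) 0 := by
  rw [show ((k : Int) + 1) = ((k + 1 : Nat) : Int) by push_cast; ring,
    PySem.List.pyGetD_natCast]

-- A's pyRange/pyGetD comprehension equals the Nat-level form, hence the pair all
theorem all_pyrange_adjacent (cmp : Int → Int → Bool) (l : List Int) :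
    (((PySem.List.pyRange 0 ((l.length : Int) - 1) 1).map
      (fun i => cmp (PySem.List.pyGetD l i 0) (PySem.List.pyGetD l (i+1) 0))).all id)
    = (l.zip l.tail).all (fun p => cmp p.1 p.2) := by
  rw [← all_range_adjacent cmp l, PySem.List.pyRange_one, List.map_map,
    show (((l.length : Int) - 1) - 0).toNat = l.length - 1 by omega]
  congr 1
  refine List.map_congr_left fun k _ => ?_
  simp only [Function.comp_apply, zero_add]
  rw [pyGetD_cast_succ]
  simp

-- adjacent-pair all = Pairwise (for the transitive relations used here)
theorem zip_all_pairwise (r : Int → Int → Prop) [DecidableRel r]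
    (ht : ∀ a b c : Int, r a b → r b c → r a c) :
    ∀ (l : List Int),
      ((l.zip l.tail).all (fun p => decide (r p.1 p.2)) = true) ↔ l.Pairwise r
  | [] => by simp
  | [x] => by simp
  | x :: y :: s => by
    have ih := zip_all_pairwise r ht (y :: s)
    simp only [List.tail_cons, List.zip_cons_cons, List.all_cons, Bool.and_eq_true,
      decide_eq_true_eq] at *
    rw [ih]
    constructor
    · rintro ⟨hxy, hp⟩
      refine List.Pairwise.cons (fun z hz => ?_) hp
      rcases List.mem_cons.1 hz with rfl | hz
      · exact hxy
      · exact ht _ _ _ hxy (List.rel_of_pairwise_cons hp hz)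
    · intro h
      exact ⟨List.rel_of_pairwise_cons h List.mem_cons_self, h.of_cons⟩

-- PySem.Set.ofList is a sublist of its argument (dedup keeps first occurrences in order)
theorem foldl_add_sublist (xs : List Int) : ∀ (acc : List Int),
    (xs.foldl PySem.Set.add acc).Sublist (acc ++ xs) := by
  induction xs with
  | nil => intro acc; simp
  | cons x t ih =>
    intro acc
    refine (ih (PySem.Set.add acc x)).trans ?_
    have h : (PySem.Set.add acc x).Sublist (acc ++ [x]) := by
      rw [PySem.Set.add_eq_ite]
      split_ifs
      · exact List.sublist_append_left acc [x]
      · exact List.Sublist.refl _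
    simpa using h.append_right t

theorem ofList_sublist (xs : List Int) : (PySem.Set.ofList xs).Sublist xs := by
  rw [PySem.Set.ofList_eq_foldl]
  simpa using foldl_add_sublist xs []

-- on a duplicate-free list, ofList is the identity
theorem foldl_add_of_nodup (xs : List Int) : ∀ (acc : List Int), (acc ++ xs).Nodup →
    xs.foldl PySem.Set.add acc = acc ++ xs := by
  induction xs with
  | nil => intro acc _; simp
  | cons x t ih =>
    intro acc h
    have hx : x ∉ acc := by
      intro hmem
      exact (List.disjoint_of_nodup_append h) hmem (List.mem_cons_self)
    simp only [List.foldl_cons, PySem.Set.add_of_not_mem hx]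
    rw [ih (acc ++ [x]) (by simpa using h)]
    simp

-- distinct-count = length ↔ no duplicates
theorem ofList_length_eq_iff (xs : List Int) :
    (PySem.Set.ofList xs).length = xs.length ↔ xs.Nodup := by
  constructor
  · intro h
    have := (ofList_sublist xs).eq_of_length h
    rw [← this]
    exact PySem.Set.nodup_ofList xs
  · intro h
    rw [PySem.Set.ofList_eq_foldl, foldl_add_of_nodup xs [] (by simpa using h)]
    simp

-- distinct-count ≤ 1 ↔ all elements equal (pairwise)
theorem ofList_length_le_one_iff (xs : List Int) :
    (PySem.Set.ofList xs).length ≤ 1 ↔ xs.Pairwise (· = ·) := by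
  constructor
  · intro h
    refine List.pairwise_of_forall_mem_list (fun a ha b hb => ?_)
    have ha' : a ∈ PySem.Set.ofList xs := (PySem.Set.mem_ofList xs a).2 ha
    have hb' : b ∈ PySem.Set.ofList xs := (PySem.Set.mem_ofList xs b).2 hb
    match hof : PySem.Set.ofList xs with
    | [] => rw [hof] at ha'; cases ha'
    | [y] =>
      rw [hof] at ha' hb'
      simp only [List.mem_singleton] at ha' hb'
      rw [ha', hb']
    | y :: z :: rest => rw [hof] at h; simp at h
  · intro h
    have hall : ∀ a ∈ xs, ∀ b ∈ xs, a = b := by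
      intro a ha b hb
      rcases eq_or_ne a b with h' | h'
      · exact h'
      · exact h.forall (fun x y (e : x = y) => e.symm) ha hb h'
    match hof : PySem.Set.ofList xs with
    | [] => simp
    | [y] => simp
    | y :: z :: rest =>
      exfalso
      have hn : (y :: z :: rest).Nodup := hof ▸ PySem.Set.nodup_ofList xs
      have hy : y ∈ xs := (PySem.Set.mem_ofList xs y).1 (hof ▸ List.mem_cons_self)
      have hz : z ∈ xs := (PySem.Set.mem_ofList xs z).1
        (hof ▸ List.mem_cons_of_mem _ List.mem_cons_self)
      have : y = z := hall y hy z hz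
      simp [this] at hn

-- nondecreasing ↔ the list equals its sort
theorem pairwise_le_iff_sorted (arr : List Int) :
    arr.Pairwise (· ≤ ·) ↔ arr = PySem.List.sorted arr (fun x => x) false := by
  constructor
  · intro h
    exact (PySem.List.sorted_eq_self_of_pairwise arr (fun x => x) h).symm
  · intro h
    rw [h]
    exact PySem.List.sorted_pairwise arr (fun x => x)

-- nonincreasing ↔ the list equals the reverse of its sort
theorem pairwise_ge_iff_sorted_rev (arr : List Int) :
    arr.Pairwise (· ≥ ·) ↔ arr = (PySem.List.sorted arr (fun x => x) false).reverse := by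
  have hrev : arr.Pairwise (· ≥ ·) ↔ arr.reverse.Pairwise (· ≤ ·) := by
    rw [List.pairwise_reverse]
  rw [hrev]
  constructor
  · intro h
    have hs : PySem.List.sorted arr.reverse (fun x => x) false = arr.reverse :=
      PySem.List.sorted_eq_self_of_pairwise arr.reverse (fun x => x) h
    have hp : PySem.List.sorted arr (fun x => x) false
        = PySem.List.sorted arr.reverse (fun x => x) false :=
      PySem.List.sorted_eq_sorted_of_perm arr arr.reverse (fun x => x)
        (fun _ _ e => e) (List.reverse_perm arr).symm
    rw [hp, hs, List.reverse_reverse]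
  · intro h
    have : arr.reverse = PySem.List.sorted arr (fun x => x) false := by
      conv_lhs => rw [h]
      rw [List.reverse_reverse]
    rw [this]
    exact PySem.List.sorted_pairwise arr (fun x => x)


-- strict pairwise = lax pairwise + nodup
theorem pairwise_lt_iff (arr : List Int) :
    arr.Pairwise (· < ·) ↔ arr.Pairwise (· ≤ ·) ∧ arr.Nodup := by
  constructor
  · intro h
    exact ⟨h.imp le_of_lt, h.imp ne_of_lt⟩
  · rintro ⟨hle, hnd⟩
    exact (hle.and hnd).imp (fun h => lt_of_le_of_ne h.1 h.2)

theorem pairwise_gt_iff (arr : List Int) :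
    arr.Pairwise (· > ·) ↔ arr.Pairwise (· ≥ ·) ∧ arr.Nodup := by
  constructor
  · intro h
    exact ⟨h.imp le_of_lt, h.imp (fun h' => (ne_of_lt h').symm)⟩
  · rintro ⟨hge, hnd⟩
    exact (hge.and hnd).imp (fun h => lt_of_le_of_ne h.1 (Ne.symm h.2))

-- both orders at once means all equal
theorem pairwise_le_ge_eq (arr : List Int)
    (h1 : arr.Pairwise (· ≤ ·)) (h2 : arr.Pairwise (· ≥ ·)) : arr.Pairwise (· = ·) :=
  (h1.and h2).imp (fun h => le_antisymm h.1 h.2)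

set_option maxHeartbeats 1000000 in
-- ===== VERDICT (by name: the statement is the Claim_ definition above) =====
theorem check_array_spec : Claim_equal_check_array := by
  intro arr _
  unfold Spec_check_array check_array check_array_alt
  dsimp only
  rw [all_pyrange_adjacent (fun a b => decide (a = b)),
    all_pyrange_adjacent (fun a b => decide (a < b)),
    all_pyrange_adjacent (fun a b => decide (a > b)),
    all_pyrange_adjacent (fun a b => decide (a ≥ b)),
    all_pyrange_adjacent (fun a b => decide (a ≤ b))]
  have hE := (zip_all_pairwise (· = ·) (fun _ _ _ h1 h2 => h1.trans h2) arr).trans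
    (ofList_length_le_one_iff arr).symm
  have hT := (zip_all_pairwise (· ≤ ·) (fun _ _ _ => le_trans) arr).trans
    (pairwise_le_iff_sorted arr)
  have hG := (zip_all_pairwise (· ≥ ·) (fun _ _ _ h1 h2 => le_trans h2 h1) arr).trans
    (pairwise_ge_iff_sorted_rev arr)
  have hTs := (zip_all_pairwise (· < ·) (fun _ _ _ => lt_trans) arr).trans
    ((pairwise_lt_iff arr).trans
      (and_congr (pairwise_le_iff_sorted arr) (ofList_length_eq_iff arr).symm))
  have hGs := (zip_all_pairwise (· > ·) (fun _ _ _ h1 h2 => lt_trans h2 h1) arr).trans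
    ((pairwise_gt_iff arr).trans
      (and_congr (pairwise_ge_iff_sorted_rev arr) (ofList_length_eq_iff arr).symm))
  have hTG : arr = PySem.List.sorted arr (fun x => x) false →
      arr = (PySem.List.sorted arr (fun x => x) false).reverse →
      (PySem.Set.ofList arr).length ≤ 1 := fun h1 h2 =>
    (ofList_length_le_one_iff arr).2
      (pairwise_le_ge_eq arr ((pairwise_le_iff_sorted arr).2 h1)
        ((pairwise_ge_iff_sorted_rev arr).2 h2))
  by_cases hE' : (PySem.Set.ofList arr).length ≤ 1
  · rw [if_pos (hE.2 hE'), if_pos hE']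
  · rw [if_neg (fun h => hE' (hE.1 h)), if_neg hE']
    by_cases hT' : arr = PySem.List.sorted arr (fun x => x) false
    · rw [if_pos hT']
      by_cases hN' : (PySem.Set.ofList arr).length = arr.length
      · rw [if_pos (hTs.2 ⟨hT', hN'⟩), if_pos hN']
      · have hnG : arr ≠ (PySem.List.sorted arr (fun x => x) false).reverse :=
          fun h => hE' (hTG hT' h)
        rw [if_neg (fun h => hN' (hTs.1 h).2),
          if_neg (fun h => hnG (hGs.1 h).1),
          if_neg (fun h => hnG (hG.1 h)),
          if_pos (hT.2 hT'), if_neg hN']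
    · rw [if_neg (fun h => hT' (hTs.1 h).1), if_neg hT']
      by_cases hG' : arr = (PySem.List.sorted arr (fun x => x) false).reverse
      · rw [if_pos hG']
        by_cases hN' : (PySem.Set.ofList arr).length = arr.length
        · rw [if_pos (hGs.2 ⟨hG', hN'⟩), if_pos hN']
        · rw [if_neg (fun h => hN' (hGs.1 h).2),
            if_pos (hG.2 hG'), if_neg hN']
      · rw [if_neg (fun h => hG' (hGs.1 h).1),
          if_neg (fun h => hG' (hG.1 h)),
          if_neg (fun h => hT' (hT.1 h)),
          if_neg hG']
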